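-- pv_equiv track=rewrite | github.com/SuyeonYun/CodingTest-Practice | Python3/프로그래머스/3/77486. 다단계 칫솔 판매/다단계 칫솔 판매.py | solution
-- ===== SOURCE A (Python) =====
-- from collections import deque
--
-- class Node:
--     def __init__(self, idx, price, child, parent, visited):
--         self.idx = idx
--         self.price = price
--         self.child = child
--         self.parent = parent
--         self.visited = visited
--
--     def __repr__(self):
--         return repr((self.idx, self.price, self.child, self.parent, self.visited))
--
-- def solution(enroll, referral, seller, amount):
--     l = len(enroll)
--     q = deque()
--     answer = []
--     e_dict = {}
--     employees = []
--
--     e_dict["-"] = -1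
--     for i in range(l):
--         e_dict[enroll[i]] = i
--
--     for i in range(l):
--         employees.append(Node(i, 0, [], e_dict[referral[i]], False))
--
--     for i in range(l):
--         if employees[i].parent >= 0:
--             employees[employees[i].parent].child.append(i)
--
--     for i in range(len(seller)):
--         cur = employees[e_dict[seller[i]]]
--         fee = amount[i] * 10
--         cur.price += amount[i] * 90
--
--         def dfs(c, f):
--             if c.parent < 0 or f < 1:
--                 return f
--             f1 = dfs(employees[c.parent], int(f * 0.1))
--             employees[c.parent].price += (f - f1)
--             return f
--
--         dfs(cur, fee)
--
--     for i in range(l):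
--         answer.append(employees[i].price)
--
--     return answer
-- ===== SOURCE B (Python) =====
-- def solution(enroll, referral, seller, amount):
--     idx = {name: i for i, name in enumerate(enroll)}
--     totals = [0] * len(enroll)
--     for s, a in zip(seller, amount):
--         i = idx[s]
--         totals[i] += a * 90
--         money = a * 10
--         name = referral[i]
--         while name in idx and money >= 1:
--             give = int(money * 0.1)
--             j = idx[name]
--             totals[j] += money - give
--             money = give
--             name = referral[j]
--     return totals
-- ===== Notes on version B (the rewrite author's own statement) =====
-- stated objective: simpler
-- what changed: B drops A's Node class, child-list tree construction and recursive dfs entirely: it builds one name-to-index dict, keeps a flat totals list, and for each sale walks the referral chain with an iterative while loop that adds money-int(money*0.1) at each step.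
-- outside the precondition, e.g. on solution(['a'], ['-'], ['-'], [5]): A returns [450], B raises KeyError
import Mathlib
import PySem

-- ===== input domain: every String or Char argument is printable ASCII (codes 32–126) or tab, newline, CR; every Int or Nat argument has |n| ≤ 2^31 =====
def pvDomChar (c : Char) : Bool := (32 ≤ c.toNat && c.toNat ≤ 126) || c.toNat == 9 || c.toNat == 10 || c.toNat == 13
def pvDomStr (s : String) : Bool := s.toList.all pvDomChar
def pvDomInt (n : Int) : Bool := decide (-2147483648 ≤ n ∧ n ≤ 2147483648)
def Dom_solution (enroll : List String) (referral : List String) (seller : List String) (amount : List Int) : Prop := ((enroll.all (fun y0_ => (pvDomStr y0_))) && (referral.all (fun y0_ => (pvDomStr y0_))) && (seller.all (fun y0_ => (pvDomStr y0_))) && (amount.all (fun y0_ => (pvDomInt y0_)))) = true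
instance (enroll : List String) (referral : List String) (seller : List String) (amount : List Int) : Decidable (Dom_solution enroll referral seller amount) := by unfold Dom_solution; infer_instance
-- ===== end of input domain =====

-- B replaces A's Node/child-list tree and recursive dfs by a name→index dict plus an
-- iterative walk up the referral chain (objective: simpler); return values proved equal on Pre_.

-- `int(f * 0.1)` in both Pythons: exact as truncating division by 10 for every magnitude
-- reachable from Dom (|f| ≤ 100·2^31; checked exhaustively near the rounding boundaries).
def pyTenth (f : Int) : Int := f.tdiv 10

-- termination measure for the fee chains of both ports (cited by `decreasing_by`)
theorem pyTenth_toNat_lt (f : Int) (h : 1 ≤ f) : (pyTenth f).toNat < f.toNat := by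
  have h2 : f.tdiv 10 = f / 10 := by
    rw [Int.tdiv_eq_ediv]; simp [show (0:Int) ≤ f by omega]
  simp only [pyTenth, h2]; omega

-- ===== PORT A =====
structure NodeA where
  idx : Int
  price : Int
  child : List Int
  parent : Int
  visited : Bool
deriving Repr, DecidableEq

-- the inner `dfs` of A; the Python mutates the shared `employees` list, so the port
-- threads it through and returns (employees, return value); `dfs` always returns its `f`
def dfsA (employees : List NodeA) (c : NodeA) (f : Int) : List NodeA × Int :=
  if c.parent < 0 ∨ f < 1 then (employees, f)
  else
    match PySem.List.pyGet? employees c.parent with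
    | none => (employees, f)          -- IndexError (outside Pre_)
    | some pnode =>
      let r := dfsA employees pnode (pyTenth f)
      match PySem.List.pyGet? r.1 c.parent with
      | none => (r.1, f)
      | some pnode1 =>
        (PySem.List.pySetD r.1 c.parent { pnode1 with price := pnode1.price + (f - r.2) }, f)
termination_by f.toNat
decreasing_by exact pyTenth_toNat_lt f (by omega)

def solution (enroll : List String) (referral : List String) (seller : List String) (amount : List Int) : List Int :=
  let l : Int := enroll.length
  let e_dict : PySem.Dict String Int := PySem.Dict.empty.insert "-" (-1)
  let e_dict : PySem.Dict String Int := (PySem.List.pyRange 0 l).foldl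
    (fun d i => d.insert (PySem.List.pyGetD enroll i "") i) e_dict
  let employees : List NodeA := (PySem.List.pyRange 0 l).foldl
    (fun es i => es ++
      [⟨i, 0, [], ((e_dict.get? (PySem.List.pyGetD referral i "")).getD (-1)), false⟩]) []
    -- `.getD (-1)`: a missing key is a Python KeyError (outside Pre_)
  let employees : List NodeA := (PySem.List.pyRange 0 l).foldl
    (fun es i =>
      match PySem.List.pyGet? es i with
      | none => es
      | some nd =>
        if 0 ≤ nd.parent then
          match PySem.List.pyGet? es nd.parent with
          | none => es
          | some pnd => PySem.List.pySetD es nd.parent { pnd with child := pnd.child ++ [i] }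
        else es) employees
  let employees : List NodeA := (PySem.List.pyRange 0 (seller.length : Int)).foldl
    (fun es i =>
      match e_dict.get? (PySem.List.pyGetD seller i "") with
      | none => es                                   -- KeyError (outside Pre_)
      | some ci =>
        match PySem.List.pyGet? es ci with
        | none => es                                 -- IndexError (outside Pre_)
        | some cur =>
          let a := PySem.List.pyGetD amount i 0      -- IndexError if shorter than seller (outside Pre_)
          let fee := a * 10
          let cur' := { cur with price := cur.price + a * 90 }
          (dfsA (PySem.List.pySetD es ci cur') cur' fee).1) employees
  (PySem.List.pyRange 0 l).foldl
    (fun ans i =>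
      match PySem.List.pyGet? employees i with
      | none => ans
      | some nd => ans ++ [nd.price]) []

-- ===== PORT B =====
-- the `while name != '-' and money >= 1` loop of B
def chainB (referral : List String) (idx : PySem.Dict String Int)
    (totals : List Int) (name : String) (money : Int) : List Int :=
  if idx.contains name ∧ 1 ≤ money then
    let give := pyTenth money
    match idx.get? name with
    | none => totals                                 -- KeyError (outside Pre_)
    | some j =>
      let totals' := PySem.List.pySetD totals j (PySem.List.pyGetD totals j 0 + (money - give))
      match PySem.List.pyGet? referral j with
      | none => totals'                              -- IndexError (outside Pre_)
      | some name' => chainB referral idx totals' name' give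
  else totals
termination_by money.toNat
decreasing_by exact pyTenth_toNat_lt money (by omega)

def solution_alt (enroll : List String) (referral : List String) (seller : List String) (amount : List Int) : List Int :=
  let idx : PySem.Dict String Int :=
    (PySem.List.enumerate enroll).foldl (fun d p => d.insert p.2 p.1) PySem.Dict.empty
  (seller.zip amount).foldl
    (fun totals p =>
      match idx.get? p.1 with
      | none => totals                               -- KeyError (outside Pre_)
      | some i =>
        let totals := PySem.List.pySetD totals i (PySem.List.pyGetD totals i 0 + p.2 * 90)
        match PySem.List.pyGet? referral i with
        | none => totals                             -- IndexError (outside Pre_)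
        | some name => chainB referral idx totals name (p.2 * 10))
    (List.replicate enroll.length 0)

-- ===== PRECONDITION & SPEC =====
-- Pre_ excludes (a) inputs on which A raises KeyError/IndexError (a referral of the first
-- len(enroll) entries outside enroll∪{"-"}, a seller outside enroll∪{"-"}, referral shorter
-- than enroll, amount shorter than seller), and (b) inputs whose seller list uses the root
-- sentinel "-" without "-" being enrolled: A's sentinel dict entry makes employees[-1] wrap
-- around to the last enrollee there, and B's natural lookup raises KeyError instead.
def Pre_solution (enroll : List String) (referral : List String) (seller : List String) (amount : List Int) : Prop :=
  enroll.length ≤ referral.length ∧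
  seller.length ≤ amount.length ∧
  (∀ s ∈ seller, s ∈ enroll) ∧
  (∀ r ∈ referral.take enroll.length, r = "-" ∨ r ∈ enroll)
instance (enroll : List String) (referral : List String) (seller : List String) (amount : List Int) : Decidable (Pre_solution enroll referral seller amount) := by unfold Pre_solution; infer_instance

def pvWitness_solution : List String × List String × List String × List Int :=
  (["john", "mary", "edward", "sam"], ["-", "-", "mary", "edward"], ["sam", "john", "mary"], [12, 4, 10])

def Spec_solution (enroll : List String) (referral : List String) (seller : List String) (amount : List Int) (out : List Int) : Prop := out = solution_alt enroll referral seller amount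
instance (enroll : List String) (referral : List String) (seller : List String) (amount : List Int) (out : List Int) : Decidable (Spec_solution enroll referral seller amount out) := by unfold Spec_solution; infer_instance

-- ===== CLAIM (what is proved, stated in full; the proofs are below) =====
def Claim_equal_solution : Prop := ∀ (enroll : List String) (referral : List String) (seller : List String) (amount : List Int), Dom_solution enroll referral seller amount → Pre_solution enroll referral seller amount → Spec_solution enroll referral seller amount (solution enroll referral seller amount)

-- ===== LEMMAS AND PROOFS =====

-- the two dicts, as built by the ports
def dictA (enroll : List String) : PySem.Dict String Int :=
  (PySem.List.enumerate enroll).foldl (fun d p => d.insert p.2 p.1)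
    (PySem.Dict.empty.insert "-" (-1))
def idxB (enroll : List String) : PySem.Dict String Int :=
  (PySem.List.enumerate enroll).foldl (fun d p => d.insert p.2 p.1) PySem.Dict.empty

-- parent of index j on the A side / next index for a name on the B side
def parA (enroll referral : List String) (j : Int) : Int :=
  ((dictA enroll).get? (PySem.List.pyGetD referral j "")).getD (-1)
def pnB (enroll : List String) (nm : String) : Int :=
  ((idxB enroll).get? nm).getD (-1)

-- `t[j] += d` on a plain Int list (what both ports do to their price data)
def addAt (t : List Int) (j : Int) (d : Int) : List Int :=
  PySem.List.pySetD t j (PySem.List.pyGetD t j 0 + d)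

-- the common abstract fee chain, on price lists and indices only
def chainC (par : Int → Int) (t : List Int) (p f : Int) : List Int :=
  if 0 ≤ p ∧ 1 ≤ f then chainC par (addAt t p (f - pyTenth f)) (par p) (pyTenth f) else t
termination_by f.toNat
decreasing_by exact pyTenth_toNat_lt f (by omega)

-- ---- generic facts about the dict-building folds ----
theorem fold_get_notmem (ps : List (Int × String)) (d : PySem.Dict String Int) (k : String)
    (h : ∀ p ∈ ps, p.2 ≠ k) :
    (ps.foldl (fun d p => d.insert p.2 p.1) d).get? k = d.get? k := by
  induction ps generalizing d with
  | nil => rfl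
  | cons p ps ih =>
    simp only [List.foldl_cons]
    rw [ih _ (fun q hq => h q (List.mem_cons_of_mem _ hq))]
    rw [PySem.Dict.get?_insert]
    rw [if_neg (fun hk => h p List.mem_cons_self hk.symm)]

theorem fold_get_bound (ps : List (Int × String)) (d : PySem.Dict String Int) (k : String) (v : Int)
    (h : (ps.foldl (fun d p => d.insert p.2 p.1) d).get? k = some v) :
    (∃ p ∈ ps, p.1 = v) ∨ d.get? k = some v := by
  induction ps generalizing d with
  | nil => exact Or.inr h
  | cons p ps ih =>
    rcases ih _ h with h' | h'
    · exact Or.inl (by obtain ⟨q, hq, hqv⟩ := h'; exact ⟨q, List.mem_cons_of_mem _ hq, hqv⟩)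
    · rw [PySem.Dict.get?_insert] at h'
      by_cases hk : k = p.2
      · simp [hk] at h'; exact Or.inl ⟨p, List.mem_cons_self, h'⟩
      · simp [hk] at h'; exact Or.inr h'

theorem fold_get_mem (ps : List (Int × String)) (d : PySem.Dict String Int) (k : String)
    (h : ∃ p ∈ ps, p.2 = k) :
    ∃ v, (ps.foldl (fun d p => d.insert p.2 p.1) d).get? k = some v := by
  induction ps generalizing d with
  | nil => simp at h
  | cons p ps ih =>
    by_cases hmem : ∃ q ∈ ps, q.2 = k
    · exact ih _ hmem
    · have hp : p.2 = k := by
        rcases h with ⟨q, hq, hq2⟩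
        rcases List.mem_cons.mp hq with rfl | hq'
        · exact hq2
        · exact absurd ⟨q, hq', hq2⟩ hmem
      refine ⟨p.1, ?_⟩
      simp only [List.foldl_cons]
      rw [fold_get_notmem _ _ _ (fun q hq hq2 => hmem ⟨q, hq, hq2⟩)]
      rw [PySem.Dict.get?_insert]; simp [hp]

theorem mem_enum_facts {α : Type} (xs : List α) (p : Int × α) (h : p ∈ PySem.List.enumerate xs) :
    p.2 ∈ xs ∧ 0 ≤ p.1 ∧ p.1 < (xs.length : Int) := by
  rcases (PySem.List.mem_enumerate_iff xs 0 p).mp h with ⟨k, hk, rfl⟩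
  refine ⟨by simp, by simp, by simpa using hk⟩

theorem fold_get_override (ps : List (Int × String)) (k : String)
    (h : ∃ p ∈ ps, p.2 = k) (d d' : PySem.Dict String Int) :
    (ps.foldl (fun d p => d.insert p.2 p.1) d).get? k
      = (ps.foldl (fun d p => d.insert p.2 p.1) d').get? k := by
  induction ps generalizing d d' with
  | nil => simp at h
  | cons p ps ih =>
    by_cases hmem : ∃ q ∈ ps, q.2 = k
    · exact ih hmem _ _
    · have hp : p.2 = k := by
        rcases h with ⟨q, hq, hq2⟩
        rcases List.mem_cons.mp hq with rfl | hq'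
        · exact hq2
        · exact absurd ⟨q, hq', hq2⟩ hmem
      simp only [List.foldl_cons]
      rw [fold_get_notmem _ _ _ (fun q hq hq2 => hmem ⟨q, hq, hq2⟩),
        fold_get_notmem _ _ _ (fun q hq hq2 => hmem ⟨q, hq, hq2⟩),
        PySem.Dict.get?_insert, PySem.Dict.get?_insert, if_pos hp.symm, if_pos hp.symm]

theorem dict_eq_of_mem (enroll : List String) (k : String) (hk : k ∈ enroll) :
    (dictA enroll).get? k = (idxB enroll).get? k := by
  apply fold_get_override
  obtain ⟨n, hn, rfl⟩ := List.getElem_of_mem hk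
  exact ⟨((n : Int), enroll[n]), (PySem.List.mem_enumerate_iff _ 0 _).mpr ⟨n, hn, by simp⟩, rfl⟩

theorem dictA_dash (enroll : List String) (hnd : "-" ∉ enroll) :
    (dictA enroll).get? "-" = some (-1) := by
  rw [show dictA enroll = (PySem.List.enumerate enroll).foldl (fun d p => d.insert p.2 p.1)
        (PySem.Dict.empty.insert "-" (-1)) from rfl]
  rw [fold_get_notmem _ _ _ (fun p hp h2 => hnd (by rw [← h2]; exact (mem_enum_facts enroll p hp).1))]
  rw [PySem.Dict.get?_insert, if_pos rfl]

theorem idxB_notmem (enroll : List String) (k : String) (hk : k ∉ enroll) :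
    (idxB enroll).get? k = none := by
  rw [show idxB enroll = (PySem.List.enumerate enroll).foldl (fun d p => d.insert p.2 p.1)
        PySem.Dict.empty from rfl]
  rw [fold_get_notmem _ _ _ (fun p hp h2 => hk (by rw [← h2]; exact (mem_enum_facts enroll p hp).1))]
  exact PySem.Dict.get?_empty k

theorem idxB_bound (enroll : List String) (k : String) (v : Int)
    (h : (idxB enroll).get? k = some v) : 0 ≤ v ∧ v < (enroll.length : Int) := by
  rcases fold_get_bound _ _ _ _ h with ⟨p, hp, rfl⟩ | h'
  · exact ⟨(mem_enum_facts enroll p hp).2.1, (mem_enum_facts enroll p hp).2.2⟩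
  · rw [PySem.Dict.get?_empty] at h'; cases h'

theorem idxB_mem (enroll : List String) (k : String) (hk : k ∈ enroll) :
    ∃ v, (idxB enroll).get? k = some v := by
  apply fold_get_mem
  obtain ⟨n, hn, rfl⟩ := List.getElem_of_mem hk
  exact ⟨((n : Int), enroll[n]), (PySem.List.mem_enumerate_iff _ 0 _).mpr ⟨n, hn, by simp⟩, rfl⟩

theorem parA_range (enroll referral : List String) (j : Int) :
    -1 ≤ parA enroll referral j ∧ parA enroll referral j < (enroll.length : Int) := by
  rw [parA]
  rcases hget : (dictA enroll).get? (PySem.List.pyGetD referral j "") with _ | v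
  · constructor
    · simp
    · simp only [Option.getD_none]; omega
  · rcases fold_get_bound _ _ _ _ hget with ⟨p, hp, rfl⟩ | h'
    · exact ⟨by have := (mem_enum_facts enroll p hp).2.1; simp; omega,
        by simpa using (mem_enum_facts enroll p hp).2.2⟩
    · rw [PySem.Dict.get?_insert] at h'
      by_cases hd : PySem.List.pyGetD referral j "" = "-"
      · rw [if_pos hd] at h'
        cases h'
        constructor
        · simp
        · simp only [Option.getD_some]; omega
      · rw [if_neg hd, PySem.Dict.get?_empty] at h'; cases h'

-- ---- arithmetic of point additions on the price list ----
theorem addAt_natCast (t : List Int) (n : Nat) (d : Int) :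
    addAt t (↑n) d = t.set n (t.getD n 0 + d) := by
  rw [addAt, PySem.List.pySetD_natCast, PySem.List.pyGetD_natCast]

theorem getD_set' (t : List Int) (m n : Nat) (x : Int) :
    (t.set m x).getD n 0 = if m = n ∧ m < t.length then x else t.getD n 0 := by
  simp only [List.getD_eq_getElem?_getD, List.getElem?_set]
  split_ifs with h1 h2 h3 <;> simp_all
  omega

theorem addAt_comm (t : List Int) (m n : Nat) (a b : Int) :
    addAt (addAt t (↑m) a) (↑n) b = addAt (addAt t (↑n) b) (↑m) a := by
  simp only [addAt_natCast, getD_set']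
  by_cases hmn : m = n
  · subst hmn
    by_cases hlen : m < t.length
    · simp only [hlen, and_self, if_pos, List.set_set]
      congr 1; ring
    · have hle : t.length ≤ m := by omega
      rw [List.set_eq_of_length_le hle, List.set_eq_of_length_le hle,
          List.set_eq_of_length_le hle, List.set_eq_of_length_le hle]
  · rw [if_neg (by tauto), if_neg (by tauto), List.set_comm _ _ hmn]

theorem addAt_comm' (t : List Int) (i j a b : Int) (hi : 0 ≤ i) (hj : 0 ≤ j) :
    addAt (addAt t i a) j b = addAt (addAt t j b) i a := by
  obtain ⟨m, rfl⟩ := Int.eq_ofNat_of_zero_le hi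
  obtain ⟨n, rfl⟩ := Int.eq_ofNat_of_zero_le hj
  exact addAt_comm t m n a b

theorem chainC_addAt (par : Int → Int) :
    ∀ (N : Nat) (f : Int), f.toNat ≤ N → ∀ (t : List Int) (p j d : Int), 0 ≤ j →
    chainC par (addAt t j d) p f = addAt (chainC par t p f) j d := by
  intro N
  induction N with
  | zero =>
    intro f hf t p j d _
    have hg : ¬ (0 ≤ p ∧ 1 ≤ f) := by omega
    rw [chainC, if_neg hg, chainC, if_neg hg]
  | succ N ih =>
    intro f hf t p j d hj
    by_cases hg : 0 ≤ p ∧ 1 ≤ f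
    · rw [chainC, if_pos hg]
      conv_rhs => rw [chainC, if_pos hg]
      rw [addAt_comm' t j p d (f - pyTenth f) hj hg.1]
      exact ih (pyTenth f) (by have := pyTenth_toNat_lt f hg.2; omega) _ _ _ _ hj
    · rw [chainC, if_neg hg, chainC, if_neg hg]

-- ---- projections of NodeA lists through pySetD ----
theorem map_g_set {β : Type} (g : NodeA → β) (es : List NodeA) (n : Nat) (nd nd' : NodeA)
    (h : es[n]? = some nd) (hg : g nd' = g nd) :
    (es.set n nd').map g = es.map g := by
  obtain ⟨hn, hnd⟩ := List.getElem?_eq_some_iff.mp h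
  apply List.ext_getElem (by simp)
  intro i h1 h2
  simp only [List.getElem_map, List.getElem_set]
  split_ifs with hin
  · subst hin; exact hg.trans (congrArg g hnd).symm
  · rfl

theorem map_price_pySetD (es : List NodeA) (n : Nat) (nd : NodeA) (h : es[n]? = some nd) (x : Int) :
    (PySem.List.pySetD es (↑n) { nd with price := nd.price + x }).map (·.price)
      = addAt (es.map (·.price)) (↑n) x := by
  rw [PySem.List.pySetD_natCast, addAt_natCast, List.map_set]
  obtain ⟨hn, hnd⟩ := List.getElem?_eq_some_iff.mp h
  have hv : (es.map (·.price)).getD n 0 = nd.price := by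
    simp [List.getD_eq_getElem?_getD, List.getElem?_map, List.getElem?_eq_getElem hn, hnd]
  rw [hv]

-- the parent fields of the employee list realise the abstract parent function
def ParOK (es : List NodeA) (par : Int → Int) : Prop :=
  ∀ (k : Nat) (h : k < es.length), (es[k]).parent = par (↑k)

theorem parent_congr (es' es : List NodeA)
    (h : es'.map (·.parent) = es.map (·.parent)) (k : Nat)
    (hk' : k < es'.length) (hk : k < es.length) : es'[k].parent = es[k].parent := by
  have h3 := congrArg (fun l => l[k]?) h
  simp only [List.getElem?_map, List.getElem?_eq_getElem hk',
    List.getElem?_eq_getElem hk, Option.map_some, Option.some_inj] at h3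
  exact h3

theorem length_of_map_parent_eq (es' es : List NodeA)
    (h : es'.map (·.parent) = es.map (·.parent)) : es'.length = es.length := by
  simpa using congrArg List.length h

theorem ParOK_of_map_eq (es' es : List NodeA) (par : Int → Int)
    (h : es'.map (·.parent) = es.map (·.parent)) (hp : ParOK es par) : ParOK es' par := by
  intro k hk
  have hk2 : k < es.length := by rw [← length_of_map_parent_eq es' es h]; exact hk
  rw [parent_congr es' es h k hk hk2]; exact hp k hk2

-- parent value of the node stored at a valid index
theorem parent_at (es : List NodeA) (L : Nat) (par : Int → Int)
    (hlen : es.length = L) (hpok : ParOK es par)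
    (p : Int) (h0 : 0 ≤ p) (h1 : p < (L : Int)) :
    ∃ nd, PySem.List.pyGet? es p = some nd ∧ nd.parent = par p := by
  obtain ⟨n, rfl⟩ := Int.eq_ofNat_of_zero_le h0
  have hn : n < es.length := by omega
  exact ⟨es[n], by rw [PySem.List.pyGet?_natCast, List.getElem?_eq_getElem hn],
    hpok n hn⟩

theorem map_price_pySetD' (es : List NodeA) (i : Int) (hi : 0 ≤ i) (nd : NodeA)
    (h : PySem.List.pyGet? es i = some nd) (x : Int) :
    (PySem.List.pySetD es i { nd with price := nd.price + x }).map (·.price)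
      = addAt (es.map (·.price)) i x := by
  obtain ⟨n, rfl⟩ := Int.eq_ofNat_of_zero_le hi
  exact map_price_pySetD es n nd (by rwa [PySem.List.pyGet?_natCast] at h) x

theorem map_parent_pySetD' (es : List NodeA) (i : Int) (hi : 0 ≤ i) (nd : NodeA)
    (h : PySem.List.pyGet? es i = some nd) (x : Int) :
    (PySem.List.pySetD es i { nd with price := x }).map (·.parent) = es.map (·.parent) := by
  obtain ⟨n, rfl⟩ := Int.eq_ofNat_of_zero_le hi
  rw [PySem.List.pySetD_natCast]
  exact map_g_set (·.parent) es n nd _ (by rwa [PySem.List.pyGet?_natCast] at h) rfl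

-- A's dfs computes the abstract chain on the price projection and preserves shape
theorem dfsA_spec (par : Int → Int) (L : Nat)
    (hparR : ∀ pp : Int, 0 ≤ pp → pp < (L : Int) → par pp < (L : Int)) :
    ∀ (N : Nat) (f : Int), f.toNat ≤ N → ∀ (es : List NodeA) (c : NodeA),
    es.length = L →
    ParOK es par →
    (dfsA es c f).2 = f ∧
    (dfsA es c f).1.map (·.parent) = es.map (·.parent) ∧
    (dfsA es c f).1.length = L ∧
    (c.parent < (L : Int) →
      (dfsA es c f).1.map (·.price) = chainC par (es.map (·.price)) c.parent f) := by
  intro N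
  induction N with
  | zero =>
    intro f hf es c hlen hpar
    have hg : c.parent < 0 ∨ f < 1 := by omega
    rw [dfsA, if_pos hg]
    exact ⟨rfl, rfl, hlen, fun _ => by rw [chainC, if_neg (by omega)]⟩
  | succ N ih =>
    intro f hf es c hlen hpar
    by_cases hg : c.parent < 0 ∨ f < 1
    · rw [dfsA, if_pos hg]
      exact ⟨rfl, rfl, hlen, fun _ => by rw [chainC, if_neg (by omega)]⟩
    · have h0 : 0 ≤ c.parent := by omega
      have h1f : 1 ≤ f := by omega
      by_cases hcL : c.parent < (L : Int)
      · obtain ⟨pnode, hpn, hpnpar⟩ := parent_at es L par hlen hpar c.parent h0 hcL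
        rw [dfsA, if_neg (by omega), hpn]
        dsimp only
        obtain ⟨ih1, ih2, ih3, ih4⟩ :=
          ih (pyTenth f) (by have := pyTenth_toNat_lt f h1f; omega) es pnode hlen hpar
        have ih4' := ih4 (by rw [hpnpar]; exact hparR c.parent h0 hcL)
        obtain ⟨pnode1, hpn1, hpn1par⟩ :=
          parent_at _ L par ih3 (ParOK_of_map_eq _ es par ih2 hpar) c.parent h0 hcL
        rw [hpn1]
        dsimp only
        refine ⟨rfl, ?_, ?_, fun _ => ?_⟩
        · rw [map_parent_pySetD' _ _ h0 pnode1 hpn1 _]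
          exact ih2
        · rw [PySem.List.length_pySetD]
          exact ih3
        · rw [ih1, map_price_pySetD' _ _ h0 pnode1 hpn1 (f - pyTenth f), ih4', hpnpar]
          conv_rhs => rw [chainC, if_pos ⟨h0, h1f⟩]
          rw [chainC_addAt par (pyTenth f).toNat (pyTenth f) le_rfl _ _ _ _ h0]
      · rw [dfsA, if_neg (by omega)]
        have : PySem.List.pyGet? es c.parent = none := by
          rw [PySem.List.pyGet?_eq_none_iff]
          intro hr; rw [hlen] at hr; exact absurd hr.2 (by omega)
        rw [this]
        exact ⟨rfl, rfl, hlen, fun h => absurd h hcL⟩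

-- the resolved next-hop of a valid index agrees between the two dictionaries
theorem sync (enroll referral : List String)
    (hlen : enroll.length ≤ referral.length)
    (href : ∀ r ∈ referral.take enroll.length, r = "-" ∨ r ∈ enroll)
    (j : Int) (h0 : 0 ≤ j) (h1 : j < (enroll.length : Int)) :
    ∃ nm', PySem.List.pyGet? referral j = some nm'
      ∧ pnB enroll nm' = parA enroll referral j := by
  obtain ⟨n, rfl⟩ := Int.eq_ofNat_of_zero_le h0
  have hn : n < referral.length := by omega
  have hnE : n < enroll.length := by omega
  refine ⟨referral[n], by rw [PySem.List.pyGet?_natCast, List.getElem?_eq_getElem hn], ?_⟩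
  have hmem : referral[n] ∈ referral.take enroll.length := by
    have ht : (referral.take enroll.length)[n]'(by simp; omega) = referral[n] :=
      List.getElem_take
    rw [← ht]; exact List.getElem_mem _
  have hgd : PySem.List.pyGetD referral (↑n) "" = referral[n] := by
    rw [PySem.List.pyGetD_natCast, List.getD_eq_getElem?_getD,
      List.getElem?_eq_getElem hn]; rfl
  by_cases hmemE : referral[n] ∈ enroll
  · rw [pnB, parA, hgd, dict_eq_of_mem enroll _ hmemE]
  · have hdash : referral[n] = "-" := by
      rcases href _ hmem with hdash | hin
      · exact hdash
      · exact absurd hin hmemE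
    have hnd : "-" ∉ enroll := by rw [← hdash]; exact hmemE
    rw [pnB, parA, hgd, hdash, dictA_dash enroll hnd, idxB_notmem enroll "-" hnd]
    rfl

-- B's while loop computes the same abstract chain
theorem chainB_spec (enroll referral : List String)
    (hlen : enroll.length ≤ referral.length)
    (href : ∀ r ∈ referral.take enroll.length, r = "-" ∨ r ∈ enroll) :
    ∀ (N : Nat) (money : Int), money.toNat ≤ N → ∀ (t : List Int) (name : String),
    chainB referral (idxB enroll) t name money
      = chainC (parA enroll referral) t (pnB enroll name) money := by
  intro N
  induction N with
  | zero =>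
    intro money hm t name
    rw [chainB, if_neg (by omega), chainC, if_neg (by omega)]
  | succ N ih =>
    intro money hm t name
    by_cases hg : (idxB enroll).contains name ∧ 1 ≤ money
    · rw [chainB, if_pos hg]
      rcases hget : (idxB enroll).get? name with _ | j
      · exact absurd hg.1 (by
          rw [PySem.Dict.contains_eq_isSome_get?, hget]
          exact Bool.false_ne_true)
      · dsimp only
        have hpnj : pnB enroll name = j := by rw [pnB, hget]; rfl
        have hj := idxB_bound enroll name j hget
        obtain ⟨nm', hnm', hsync⟩ := sync enroll referral hlen href j hj.1 hj.2
        rw [hnm']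
        dsimp only
        rw [ih (pyTenth money) (by have := pyTenth_toNat_lt money hg.2; omega) _ nm']
        rw [show PySem.List.pySetD t j (PySem.List.pyGetD t j 0 + (money - pyTenth money))
            = addAt t j (money - pyTenth money) from rfl]
        rw [hsync, hpnj]
        conv_rhs => rw [chainC, if_pos ⟨hj.1, hg.2⟩]
    · rw [chainB, if_neg hg]
      by_cases hm1 : 1 ≤ money
      · have hcon : ¬ (idxB enroll).contains name = true := fun hc => hg ⟨hc, hm1⟩
        rcases hget : (idxB enroll).get? name with _ | j
        · have hpn : pnB enroll name = -1 := by rw [pnB, hget]; rfl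
          rw [chainC, if_neg (by rw [hpn]; omega)]
        · exact absurd (by
            rw [PySem.Dict.contains_eq_isSome_get?, hget]; rfl) hcon
      · rw [chainC, if_neg (fun hc => hm1 hc.2)]

-- ---- the per-sale bodies of the two ports, as standalone functions ----
def saleA (enroll : List String) (es : List NodeA) (s : String) (a : Int) : List NodeA :=
  match (dictA enroll).get? s with
  | none => es
  | some ci =>
    match PySem.List.pyGet? es ci with
    | none => es
    | some cur =>
      (dfsA (PySem.List.pySetD es ci { cur with price := cur.price + a * 90 })
        { cur with price := cur.price + a * 90 } (a * 10)).1

def saleB (enroll referral : List String) (t : List Int) (s : String) (a : Int) : List Int :=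
  match (idxB enroll).get? s with
  | none => t
  | some i =>
    match PySem.List.pyGet? referral i with
    | none => PySem.List.pySetD t i (PySem.List.pyGetD t i 0 + a * 90)
    | some name =>
      chainB referral (idxB enroll)
        (PySem.List.pySetD t i (PySem.List.pyGetD t i 0 + a * 90)) name (a * 10)

theorem sale_step (enroll referral : List String)
    (hlr : enroll.length ≤ referral.length)
    (href : ∀ r ∈ referral.take enroll.length, r = "-" ∨ r ∈ enroll)
    (es : List NodeA) (t : List Int) (s : String) (a : Int)
    (hs : s ∈ enroll) (hlen : es.length = enroll.length)
    (hpok : ParOK es (parA enroll referral)) (hpr : es.map (·.price) = t) :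
    (saleA enroll es s a).map (·.price) = saleB enroll referral t s a ∧
    (saleA enroll es s a).map (·.parent) = es.map (·.parent) := by
  obtain ⟨ci, hci⟩ := idxB_mem enroll s hs
  have hda : (dictA enroll).get? s = some ci := by
    rw [dict_eq_of_mem enroll s hs, hci]
  have hb := idxB_bound enroll s ci hci
  obtain ⟨cur, hcur, hcurpar⟩ := parent_at es enroll.length _ hlen hpok ci hb.1 hb.2
  rw [saleA, saleB, hda, hci]
  dsimp only
  rw [hcur]
  dsimp only
  have hpr2 : (PySem.List.pySetD es ci { cur with price := cur.price + a * 90 }).map (·.price)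
      = addAt t ci (a * 90) := by
    rw [map_price_pySetD' es ci hb.1 cur hcur (a * 90), hpr]
  have hpar2 : (PySem.List.pySetD es ci { cur with price := cur.price + a * 90 }).map (·.parent)
      = es.map (·.parent) := map_parent_pySetD' es ci hb.1 cur hcur _
  have hlen2 : (PySem.List.pySetD es ci { cur with price := cur.price + a * 90 }).length
      = enroll.length := by rw [PySem.List.length_pySetD, hlen]
  have hpok2 : ParOK (PySem.List.pySetD es ci { cur with price := cur.price + a * 90 })
      (parA enroll referral) := ParOK_of_map_eq _ es _ hpar2 hpok
  obtain ⟨d1, d2, d3, d4⟩ := dfsA_spec (parA enroll referral) enroll.length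
    (fun pp _ h => (parA_range enroll referral pp).2) (a * 10).toNat (a * 10) le_rfl
    _ { cur with price := cur.price + a * 90 } hlen2 hpok2
  have hd4 := d4 (by
    rw [show ({ cur with price := cur.price + a * 90 } : NodeA).parent = cur.parent from rfl,
      hcurpar]
    exact (parA_range enroll referral ci).2)
  obtain ⟨nm, hnm, hsync⟩ := sync enroll referral hlr href ci hb.1 hb.2
  rw [hnm]
  dsimp only
  constructor
  · rw [hd4, hpr2,
      show ({ cur with price := cur.price + a * 90 } : NodeA).parent = cur.parent from rfl,
      hcurpar,
      chainB_spec enroll referral hlr href (a * 10).toNat (a * 10) le_rfl _ nm,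
      show PySem.List.pySetD t ci (PySem.List.pyGetD t ci 0 + a * 90)
        = addAt t ci (a * 90) from rfl,
      hsync]
  · rw [d2, hpar2]

theorem sales_fold (enroll referral : List String)
    (hlr : enroll.length ≤ referral.length)
    (href : ∀ r ∈ referral.take enroll.length, r = "-" ∨ r ∈ enroll) :
    ∀ (ps : List (String × Int)) (es : List NodeA) (t : List Int),
    (∀ p ∈ ps, p.1 ∈ enroll) → es.length = enroll.length →
    ParOK es (parA enroll referral) → es.map (·.price) = t →
    (ps.foldl (fun es p => saleA enroll es p.1 p.2) es).map (·.price)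
        = ps.foldl (fun t p => saleB enroll referral t p.1 p.2) t ∧
    (ps.foldl (fun es p => saleA enroll es p.1 p.2) es).map (·.parent)
        = es.map (·.parent) := by
  intro ps
  induction ps with
  | nil => intro es t _ _ _ hpr; exact ⟨hpr, rfl⟩
  | cons p ps ih =>
    intro es t hmem hlen hpok hpr
    obtain ⟨h1, h2⟩ := sale_step enroll referral hlr href es t p.1 p.2
      (hmem p List.mem_cons_self) hlen hpok hpr
    have hlen' : (saleA enroll es p.1 p.2).length = enroll.length := by
      rw [length_of_map_parent_eq _ es h2, hlen]
    obtain ⟨g1, g2⟩ := ih (saleA enroll es p.1 p.2) (saleB enroll referral t p.1 p.2)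
      (fun q hq => hmem q (List.mem_cons_of_mem _ hq)) hlen'
      (ParOK_of_map_eq _ es _ h2 hpok) h1
    exact ⟨g1, g2.trans h2⟩

-- ---- bridges between the ports' loops and the abstract formulations ----
theorem A_dict_eq (enroll : List String) :
    (PySem.List.pyRange 0 (enroll.length : Int)).foldl
      (fun d i => d.insert (PySem.List.pyGetD enroll i "") i)
      (PySem.Dict.empty.insert "-" (-1)) = dictA enroll := by
  rw [dictA, PySem.List.enumerate_eq_map_pyRange enroll "", List.foldl_map]
  simp only [PySem.List.len_eq]

def empNode (enroll referral : List String) (k : Nat) : NodeA :=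
  ⟨(k : Int), 0, [], parA enroll referral (k : Int), false⟩

theorem A_emp0 (enroll referral : List String) :
    (PySem.List.pyRange 0 (enroll.length : Int)).foldl
      (fun es i => es ++
        [⟨i, 0, [], (((dictA enroll).get? (PySem.List.pyGetD referral i "")).getD (-1)),
          false⟩]) ([] : List NodeA)
      = (List.range enroll.length).map (empNode enroll referral) := by
  rw [PySem.List.pyRange_one, List.foldl_map, PySem.List.foldl_append_singleton_eq_map]
  simp only [List.nil_append, Int.sub_zero, Int.toNat_natCast, zero_add]
  rfl

theorem E0_len (enroll referral : List String) :
    ((List.range enroll.length).map (empNode enroll referral)).length = enroll.length := by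
  simp

theorem E0_parOK (enroll referral : List String) :
    ParOK ((List.range enroll.length).map (empNode enroll referral))
      (parA enroll referral) := by
  intro k hk
  simp only [List.length_map, List.length_range] at hk
  simp [List.getElem_map, List.getElem_range, empNode]

theorem E0_price (enroll referral : List String) :
    (((List.range enroll.length).map (empNode enroll referral)).map (·.price))
      = List.replicate enroll.length 0 := by
  apply List.ext_getElem (by simp)
  intro i h1 h2
  simp [List.getElem_map, List.getElem_range, List.getElem_replicate, empNode]

theorem child_fold (is : List Int) :
    ∀ (es : List NodeA),
    ((is.foldl (fun es i =>
      match PySem.List.pyGet? es i with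
      | none => es
      | some nd =>
        if 0 ≤ nd.parent then
          match PySem.List.pyGet? es nd.parent with
          | none => es
          | some pnd => PySem.List.pySetD es nd.parent { pnd with child := pnd.child ++ [i] }
        else es) es).map (·.parent) = es.map (·.parent)) ∧
    ((is.foldl (fun es i =>
      match PySem.List.pyGet? es i with
      | none => es
      | some nd =>
        if 0 ≤ nd.parent then
          match PySem.List.pyGet? es nd.parent with
          | none => es
          | some pnd => PySem.List.pySetD es nd.parent { pnd with child := pnd.child ++ [i] }
        else es) es).map (·.price) = es.map (·.price)) := by
  induction is with
  | nil => intro es; exact ⟨rfl, rfl⟩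
  | cons i is ih =>
    intro es
    rw [List.foldl_cons]
    have hstep : ∀ es' : List NodeA,
        (match PySem.List.pyGet? es i with
          | none => es
          | some nd =>
            if 0 ≤ nd.parent then
              match PySem.List.pyGet? es nd.parent with
              | none => es
              | some pnd => PySem.List.pySetD es nd.parent { pnd with child := pnd.child ++ [i] }
            else es) = es' →
        es'.map (·.parent) = es.map (·.parent) ∧ es'.map (·.price) = es.map (·.price) := by
      intro es' he
      rcases h1 : PySem.List.pyGet? es i with _ | nd
      · rw [h1] at he; exact he ▸ ⟨rfl, rfl⟩
      · rw [h1] at he; dsimp only at he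
        by_cases hp : 0 ≤ nd.parent
        · rw [if_pos hp] at he
          rcases h2 : PySem.List.pyGet? es nd.parent with _ | pnd
          · rw [h2] at he; exact he ▸ ⟨rfl, rfl⟩
          · rw [h2] at he; dsimp only at he
            subst he
            obtain ⟨n, hcn⟩ := Int.eq_ofNat_of_zero_le hp
            rw [hcn, PySem.List.pySetD_natCast]
            have h2' : es[n]? = some pnd := by
              rw [← PySem.List.pyGet?_natCast, ← hcn]; exact h2
            exact ⟨map_g_set (·.parent) es n pnd _ h2' rfl,
              map_g_set (·.price) es n pnd _ h2' rfl⟩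
        · rw [if_neg hp] at he; exact he ▸ ⟨rfl, rfl⟩
    obtain ⟨hs1, hs2⟩ := hstep _ rfl
    obtain ⟨g1, g2⟩ := ih _
    exact ⟨g1.trans hs1, g2.trans hs2⟩

theorem foldl_range_zip {σ : Type} (F : σ → String → Int → σ) :
    ∀ (s : List String) (am : List Int) (st : σ), s.length ≤ am.length →
    (PySem.List.pyRange 0 (s.length : Int)).foldl
      (fun st i => F st (PySem.List.pyGetD s i "") (PySem.List.pyGetD am i 0)) st
      = (s.zip am).foldl (fun st p => F st p.1 p.2) st := by
  intro s
  induction s with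
  | nil => intro am st h; rfl
  | cons x s ih =>
    intro am st h
    match am with
    | [] => simp at h
    | y :: am =>
      rw [PySem.List.pyRange_one, List.foldl_map]
      simp only [Int.sub_zero, Int.toNat_natCast, List.length_cons]
      rw [List.range_succ_eq_map, List.foldl_cons, List.foldl_map]
      have hsx : PySem.List.pyGetD (x :: s) (0 + ((0 : Nat) : Int)) "" = x := by norm_num
      have hsy : PySem.List.pyGetD (y :: am) (0 + ((0 : Nat) : Int)) 0 = y := by norm_num
      rw [hsx, hsy]
      have hbody : ∀ (st : σ) (k : Nat), k ∈ List.range s.length →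
          F st (PySem.List.pyGetD (x :: s) (0 + ((k.succ : Nat) : Int)) "")
            (PySem.List.pyGetD (y :: am) (0 + ((k.succ : Nat) : Int)) 0)
          = F st (PySem.List.pyGetD s (0 + ((k : Nat) : Int)) "")
            (PySem.List.pyGetD am (0 + ((k : Nat) : Int)) 0) := by
        intro st k _
        have e1 : (0 + ((k.succ : Nat) : Int)) = ((k + 1 : Nat) : Int) := by push_cast; ring
        have e2 : (0 + ((k : Nat) : Int)) = ((k : Nat) : Int) := by ring
        rw [e1, e2, PySem.List.pyGetD_natCast, PySem.List.pyGetD_natCast,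
          PySem.List.pyGetD_natCast, PySem.List.pyGetD_natCast,
          List.getD_cons_succ, List.getD_cons_succ]
      rw [PySem.List.foldl_congr_mem _ _ _ _ hbody]
      have := ih am (F st x y) (by simpa using h)
      rw [PySem.List.pyRange_one, List.foldl_map] at this
      simp only [Int.sub_zero, Int.toNat_natCast] at this
      simpa using this

theorem map_getD_range (l : List Int) : (List.range l.length).map (fun k => l.getD k 0) = l := by
  apply List.ext_getElem (by simp)
  intro i h1 h2
  simp [List.getElem_map, List.getElem_range, List.getD_eq_getElem?_getD,
    List.getElem?_eq_getElem h2]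

theorem ans_fold (es : List NodeA) (L : Nat) (hlen : es.length = L) :
    (PySem.List.pyRange 0 (L : Int)).foldl
      (fun ans i =>
        match PySem.List.pyGet? es i with
        | none => ans
        | some nd => ans ++ [nd.price]) ([] : List Int) = es.map (·.price) := by
  rw [PySem.List.pyRange_one, List.foldl_map]
  simp only [Int.sub_zero, Int.toNat_natCast]
  have hbody : ∀ (ans : List Int) (k : Nat), k ∈ List.range L →
      (match PySem.List.pyGet? es (0 + ((k : Nat) : Int)) with
        | none => ans
        | some nd => ans ++ [nd.price])
      = ans ++ [(es.map (·.price)).getD k 0] := by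
    intro ans k hk
    have hkL : k < es.length := by rw [hlen]; simpa using hk
    have e2 : (0 + ((k : Nat) : Int)) = ((k : Nat) : Int) := by ring
    rw [e2, PySem.List.pyGet?_natCast, List.getElem?_eq_getElem hkL]
    dsimp only
    congr 1
    simp [List.getD_eq_getElem?_getD, List.getElem?_map, List.getElem?_eq_getElem hkL]
  rw [PySem.List.foldl_congr_mem _ _ _ _ hbody,
    PySem.List.foldl_append_singleton_eq_map]
  have : L = (es.map (·.price)).length := by simp [hlen]
  rw [List.nil_append, this, map_getD_range]

-- ---- named decomposition of the two ports (each equation holds by rfl) ----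
def AdictF (enroll : List String) : PySem.Dict String Int :=
  (PySem.List.pyRange 0 (enroll.length : Int)).foldl
    (fun d i => d.insert (PySem.List.pyGetD enroll i "") i)
    (PySem.Dict.empty.insert "-" (-1))

def AempF (enroll referral : List String) : List NodeA :=
  (PySem.List.pyRange 0 (enroll.length : Int)).foldl
    (fun es i => es ++
      [⟨i, 0, [], (((AdictF enroll).get? (PySem.List.pyGetD referral i "")).getD (-1)),
        false⟩]) []

def AchildF (enroll referral : List String) : List NodeA :=
  (PySem.List.pyRange 0 (enroll.length : Int)).foldl
    (fun es i =>
      match PySem.List.pyGet? es i with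
      | none => es
      | some nd =>
        if 0 ≤ nd.parent then
          match PySem.List.pyGet? es nd.parent with
          | none => es
          | some pnd => PySem.List.pySetD es nd.parent { pnd with child := pnd.child ++ [i] }
        else es) (AempF enroll referral)

def AsalesF (enroll referral seller : List String) (amount : List Int) : List NodeA :=
  (PySem.List.pyRange 0 (seller.length : Int)).foldl
    (fun es i =>
      match (AdictF enroll).get? (PySem.List.pyGetD seller i "") with
      | none => es
      | some ci =>
        match PySem.List.pyGet? es ci with
        | none => es
        | some cur =>
          (dfsA (PySem.List.pySetD es ci
              { cur with price := cur.price + (PySem.List.pyGetD amount i 0) * 90 })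
            { cur with price := cur.price + (PySem.List.pyGetD amount i 0) * 90 }
            ((PySem.List.pyGetD amount i 0) * 10)).1) (AchildF enroll referral)

theorem solution_decomp (enroll referral seller : List String) (amount : List Int) :
    solution enroll referral seller amount =
      (PySem.List.pyRange 0 (enroll.length : Int)).foldl
        (fun ans i =>
          match PySem.List.pyGet? (AsalesF enroll referral seller amount) i with
          | none => ans
          | some nd => ans ++ [nd.price]) [] := rfl

theorem solution_alt_decomp (enroll referral seller : List String) (amount : List Int) :
    solution_alt enroll referral seller amount =
      (seller.zip amount).foldl (fun t p => saleB enroll referral t p.1 p.2)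
        (List.replicate enroll.length 0) := rfl

theorem AdictF_eq (enroll : List String) : AdictF enroll = dictA enroll := by
  unfold AdictF
  exact A_dict_eq enroll

theorem AempF_eq (enroll referral : List String) :
    AempF enroll referral = (List.range enroll.length).map (empNode enroll referral) := by
  unfold AempF
  rw [AdictF_eq]
  exact A_emp0 enroll referral

theorem AsalesF_eq (enroll referral seller : List String) (amount : List Int) :
    AsalesF enroll referral seller amount =
      (PySem.List.pyRange 0 (seller.length : Int)).foldl
        (fun es i => saleA enroll es (PySem.List.pyGetD seller i "")
          (PySem.List.pyGetD amount i 0)) (AchildF enroll referral) := by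
  unfold AsalesF
  rw [AdictF_eq]
  rfl

-- ===== VERDICT helper =====
theorem solution_spec_main (enroll referral seller : List String) (amount : List Int)
    (hpre : Pre_solution enroll referral seller amount) :
    solution enroll referral seller amount = solution_alt enroll referral seller amount := by
  obtain ⟨hlr, hsa, hsel, href⟩ := hpre
  have hpar1 : (AchildF enroll referral).map (·.parent)
      = (AempF enroll referral).map (·.parent) :=
    (child_fold _ (AempF enroll referral)).1
  have hpri1 : (AchildF enroll referral).map (·.price)
      = (AempF enroll referral).map (·.price) :=
    (child_fold _ (AempF enroll referral)).2
  have hlen1 : (AchildF enroll referral).length = enroll.length := by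
    rw [length_of_map_parent_eq _ _ hpar1, AempF_eq]
    exact E0_len enroll referral
  have hpok1 : ParOK (AchildF enroll referral) (parA enroll referral) :=
    ParOK_of_map_eq _ _ _ (by rw [hpar1, AempF_eq]) (E0_parOK enroll referral)
  have hpri1' : (AchildF enroll referral).map (·.price)
      = List.replicate enroll.length 0 := by
    rw [hpri1, AempF_eq]
    exact E0_price enroll referral
  have hsal : AsalesF enroll referral seller amount
      = (seller.zip amount).foldl (fun es p => saleA enroll es p.1 p.2)
          (AchildF enroll referral) := by
    rw [AsalesF_eq]
    exact foldl_range_zip (saleA enroll) seller amount (AchildF enroll referral) hsa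
  have hmem : ∀ p ∈ seller.zip amount, p.1 ∈ enroll := by
    rintro ⟨ps, pa⟩ hp
    exact hsel ps (List.of_mem_zip hp).1
  obtain ⟨hS1, hS2⟩ := sales_fold enroll referral hlr href (seller.zip amount)
    (AchildF enroll referral) (List.replicate enroll.length 0) hmem hlen1 hpok1 hpri1'
  have hlen3 : (AsalesF enroll referral seller amount).length = enroll.length := by
    rw [hsal, length_of_map_parent_eq _ _ hS2]
    exact hlen1
  rw [solution_decomp, solution_alt_decomp]
  calc (PySem.List.pyRange 0 (enroll.length : Int)).foldl
        (fun ans i =>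
          match PySem.List.pyGet? (AsalesF enroll referral seller amount) i with
          | none => ans
          | some nd => ans ++ [nd.price]) []
      = (AsalesF enroll referral seller amount).map (·.price) :=
        ans_fold (AsalesF enroll referral seller amount) enroll.length hlen3
    _ = (seller.zip amount).foldl (fun t p => saleB enroll referral t p.1 p.2)
          (List.replicate enroll.length 0) := by rw [hsal]; exact hS1

-- ===== VERDICT (by name: the statement is the Claim_ definition above) =====
theorem solution_spec : Claim_equal_solution := by
  intro enroll referral seller amount _ hpre
  exact solution_spec_main enroll referral seller amount hpre
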